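-- pv_equiv track=rewrite | github.com/vatsal22/python_sandbox | google1.py | solution
-- ===== SOURCE A (Python) =====
-- def isSmaller(stringA, stringB):
--     smallestCharA = stringA[0]
--     countA = 0
--     for char in stringA:
--         if char < smallestCharA:
--             smallestCharA=char
--             countA+=1
--         elif char == smallestCharA:
--             countA+=1
--
--     smallestCharB = stringB[0]
--     countB = 0
--     for char in stringB:
--         if char < smallestCharB:
--             smallestCharB=char
--             countB+=1
--         elif char == smallestCharB:
--             countB+=1
--
--     return True if countA < countB else False
--
-- def solution(A, B):
--     """Your solution goes here."""
--     A = A.split(',')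
--     B = B.split(',')
--
--     arr = []
--
--     for wordB in B:
--         count = 0
--         for wordA in A:
--             if isSmaller(wordA, wordB):
--                 count+=1
--         arr.append(count)
--
--     return arr
-- ===== SOURCE B (Python) =====
-- def _stat(w):
--     smallest = w[0]
--     c = 0
--     for ch in w:
--         if ch < smallest:
--             smallest = ch
--             c += 1
--         elif ch == smallest:
--             c += 1
--     return c
--
--
-- def _bisect_left(a, x):
--     lo, hi = 0, len(a)
--     while lo < hi:
--         mid = (lo + hi) // 2
--         if a[mid] < x:
--             lo = mid + 1
--         else:
--             hi = mid
--     return lo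
--
--
-- def solution(A, B):
--     """Your solution goes here."""
--     stats = sorted(_stat(w) for w in A.split(','))
--     return [_bisect_left(stats, _stat(w)) for w in B.split(',')]
-- ===== Notes on version B (the rewrite author's own statement) =====
-- stated objective: alternative
-- what changed: Each word's stat (count of occurrences of its running-minimum character) is computed once instead of recomputed per pair; A's stats are sorted and each B word's answer is obtained by binary search (bisect_left) instead of a full scan of A recomputing both stats.
import Mathlib
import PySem

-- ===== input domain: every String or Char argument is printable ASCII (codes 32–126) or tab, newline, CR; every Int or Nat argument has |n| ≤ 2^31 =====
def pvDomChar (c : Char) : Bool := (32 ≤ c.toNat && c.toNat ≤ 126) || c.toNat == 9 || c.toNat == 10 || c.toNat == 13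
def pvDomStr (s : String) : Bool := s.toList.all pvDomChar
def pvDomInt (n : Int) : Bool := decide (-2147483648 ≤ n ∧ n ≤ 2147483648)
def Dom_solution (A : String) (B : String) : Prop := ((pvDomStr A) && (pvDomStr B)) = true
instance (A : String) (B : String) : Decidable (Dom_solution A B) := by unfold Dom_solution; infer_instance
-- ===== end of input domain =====

-- B precomputes each word's stat once, sorts A's stats and answers each B word by binary search (alternative algorithm); equal to A on all inputs where A returns (empty words raise in both and are excluded by Pre_).

-- ===== PORT A =====
-- isSmaller(stringA, stringB); stringX[0] raises IndexError on an empty word — Pre_solution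
-- excludes that, so the headD default is never reached on admitted inputs.
def isSmallerP (stringA : String) (stringB : String) : Bool :=
  let a := stringA.toList
  let b := stringB.toList
  let ra := a.foldl
    (fun (st : Char × Int) ch =>
      if ch < st.1 then (ch, st.2 + 1)
      else if ch == st.1 then (st.1, st.2 + 1) else st)
    (a.headD ' ', 0)
  let rb := b.foldl
    (fun (st : Char × Int) ch =>
      if ch < st.1 then (ch, st.2 + 1)
      else if ch == st.1 then (st.1, st.2 + 1) else st)
    (b.headD ' ', 0)
  decide (ra.2 < rb.2)

def solution (A : String) (B : String) : List Int :=
  let As := (PySem.Str.split? A ",").getD []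
  let Bs := (PySem.Str.split? B ",").getD []
  Bs.foldl
    (fun arr wordB =>
      arr ++ [As.foldl (fun count wordA =>
        if isSmallerP wordA wordB then count + 1 else count) (0 : Int)])
    []

-- ===== PORT B =====
-- _stat(w); w[0] raises on an empty word — excluded by Pre_solution, headD default unreached.
def statP (w : String) : Int :=
  (w.toList.foldl
    (fun (st : Char × Int) ch =>
      if ch < st.1 then (ch, st.2 + 1)
      else if ch == st.1 then (st.1, st.2 + 1) else st)
    (w.toList.headD ' ', 0)).2

-- _bisect_left(a, x): the while-loop becomes structural recursion on a fuel counter;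
-- hi - lo strictly decreases each iteration, so fuel = hi - lo suffices.
def blPAux : Nat → List Int → Int → Nat → Nat → Nat
  | 0, _, _, lo, _ => lo
  | fuel + 1, a, x, lo, hi =>
    if lo < hi then
      let mid := (lo + hi) / 2
      if a.getD mid 0 < x then blPAux fuel a x (mid + 1) hi
      else blPAux fuel a x lo mid
    else lo

def blP (a : List Int) (x : Int) (lo hi : Nat) : Nat :=
  blPAux (hi - lo) a x lo hi

def solution_alt (A : String) (B : String) : List Int :=
  let stats := PySem.List.sorted (((PySem.Str.split? A ",").getD []).map statP) (fun s => s) false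
  ((PySem.Str.split? B ",").getD []).map (fun w => (blP stats (statP w) 0 stats.length : Int))

-- ===== PRECONDITION & SPEC =====
-- Pre_ excludes exactly the inputs containing an empty comma-separated word, on which
-- A (and B) raise IndexError at word[0].
def Pre_solution (A : String) (B : String) : Prop :=
  "" ∉ (PySem.Str.split? A ",").getD [] ∧ "" ∉ (PySem.Str.split? B ",").getD []
instance (A : String) (B : String) : Decidable (Pre_solution A B) := by unfold Pre_solution; infer_instance
def pvWitness_solution : String × String := ("ab,b", "c")

def Spec_solution (A : String) (B : String) (out : List Int) : Prop := out = solution_alt A B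
instance (A : String) (B : String) (out : List Int) : Decidable (Spec_solution A B out) := by unfold Spec_solution; infer_instance

-- ===== CLAIM (what is proved, stated in full; the proofs are below) =====
def Claim_equal_solution : Prop := ∀ (A : String) (B : String), Dom_solution A B → Pre_solution A B → Spec_solution A B (solution A B)

-- ===== LEMMAS AND PROOFS =====

-- A's pairwise comparison is exactly "stat < stat"
lemma isSmallerP_eq (a b : String) : isSmallerP a b = decide (statP a < statP b) := rfl

-- In a ≤-sorted Int list, the elements < x are exactly the first (countP (· < x)) ones
lemma count_lt_iff (x : Int) : ∀ (l : List Int), l.Pairwise (· ≤ ·) →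
    ∀ i (h : i < l.length), (l[i] < x ↔ i < l.countP (fun a => decide (a < x)))
  | [], _, i, h => absurd h (by simp)
  | a :: t, hp, i, h => by
    rcases List.pairwise_cons.mp hp with ⟨ha, hp'⟩
    rw [List.countP_cons]
    rcases i with _ | j
    · simp only [List.getElem_cons_zero]
      by_cases hax : a < x
      · simp [hax]
      · have ht : t.countP (fun a => decide (a < x)) = 0 :=
          List.countP_eq_zero.mpr (fun b hb => by
            simpa using not_lt.mpr (le_trans (not_lt.mp hax) (ha b hb)))
        simp [hax, ht]
    · simp only [List.getElem_cons_succ]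
      have hj : j < t.length := by simpa using h
      have := count_lt_iff x t hp' j hj
      by_cases hax : a < x
      · simp only [hax, decide_true, if_true]; omega
      · have ht : t.countP (fun a => decide (a < x)) = 0 :=
          List.countP_eq_zero.mpr (fun b hb => by
            simpa using not_lt.mpr (le_trans (not_lt.mp hax) (ha b hb)))
        have hnt : ¬ t[j] < x := fun hlt => by have := this.mp hlt; omega
        simp [hax, hnt, ht]

-- correctness of the hand-written bisect: it finds k when indices < k are exactly those with value < x
lemma blPAux_eq (l : List Int) (x : Int) (k : Nat)
    (hk : ∀ i (h : i < l.length), (l[i] < x ↔ i < k)) :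
    ∀ n lo hi, hi - lo ≤ n → lo ≤ k → k ≤ hi → hi ≤ l.length → blPAux n l x lo hi = k := by
  intro n
  induction n with
  | zero =>
    intro lo hi hn hlo hhi hlen
    simp only [blPAux]; omega
  | succ m ih =>
    intro lo hi hn hlo hhi hlen
    rw [blPAux]
    by_cases hlh : lo < hi
    · simp only [hlh, if_true]
      have hmid₁ : lo ≤ (lo + hi) / 2 := by omega
      have hmid₂ : (lo + hi) / 2 < hi := by omega
      have hml : (lo + hi) / 2 < l.length := by omega
      have hg : l.getD ((lo + hi) / 2) 0 = l[(lo + hi) / 2] := List.getD_eq_getElem l 0 hml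
      by_cases hc : l.getD ((lo + hi) / 2) 0 < x
      · simp only [hc, if_true]
        have : (lo + hi) / 2 < k := (hk _ hml).mp (hg ▸ hc)
        exact ih ((lo + hi) / 2 + 1) hi (by omega) (by omega) hhi hlen
      · simp only [hc, if_false]
        have : ¬ (lo + hi) / 2 < k := fun hlt => hc (hg ▸ (hk _ hml).mpr hlt)
        exact ih lo ((lo + hi) / 2) (by omega) hlo (by omega) (by omega)
    · simp [hlh]; omega

lemma blP_eq (l : List Int) (x : Int) (k : Nat)
    (hk : ∀ i (h : i < l.length), (l[i] < x ↔ i < k))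
    (hlo : 0 ≤ k) (hhi : k ≤ l.length) : blP l x 0 l.length = k :=
  blPAux_eq l x k hk (l.length - 0) 0 l.length (le_refl _) hlo hhi (le_refl _)

-- per-B-word: A's inner scan equals B's binary search over the sorted stats
lemma perWord (As : List String) (wB : String) :
    As.foldl (fun count wordA => if isSmallerP wordA wB then count + 1 else count) (0 : Int)
      = ((blP (PySem.List.sorted (As.map statP) (fun s => s) false) (statP wB) 0
            (PySem.List.sorted (As.map statP) (fun s => s) false).length : Nat) : Int) := by
  set stats := PySem.List.sorted (As.map statP) (fun s => s) false with hstats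
  have hpair : stats.Pairwise (· ≤ ·) := by
    simpa using PySem.List.sorted_pairwise (xs := As.map statP) (key := fun s => s)
  set k := stats.countP (fun a => decide (a < statP wB)) with hkdef
  have hkle : k ≤ stats.length := List.countP_le_length
  have hcount : As.countP (fun wordA => isSmallerP wordA wB) = k := by
    have h1 : As.countP (fun wordA => isSmallerP wordA wB)
        = As.countP (fun wordA => decide (statP wordA < statP wB)) := by
      apply List.countP_congr; intro a _; rw [isSmallerP_eq]
    have h2 : (As.map statP).countP (fun a => decide (a < statP wB))
        = As.countP (fun wordA => decide (statP wordA < statP wB)) := by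
      simp [List.countP_map, Function.comp_def]
    have h3 : stats.countP (fun a => decide (a < statP wB))
        = (As.map statP).countP (fun a => decide (a < statP wB)) :=
      (PySem.List.sorted_perm (xs := As.map statP) (key := fun s => s) (rev := false)).countP_eq _
    omega
  have hbl : blP stats (statP wB) 0 stats.length = k :=
    blP_eq stats (statP wB) k (count_lt_iff (statP wB) stats hpair) (by omega) hkle
  rw [hbl, ← hcount, PySem.List.foldl_if_add_one (fun wordA => isSmallerP wordA wB) As 0]
  simp

-- ===== VERDICT (by name: the statement is the Claim_ definition above) =====
theorem solution_spec : Claim_equal_solution := by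
  intro A B _ _
  unfold Spec_solution solution solution_alt
  rw [PySem.List.foldl_append_singleton_eq_map]
  exact List.map_congr_left (fun wB _ => perWord _ wB)
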